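-- pv_equiv track=rewrite | github.com/OCS53/OpenBIM-Deflect | backend/app/services/frd_extract.py | _find_all_block_slices
-- ===== SOURCE A (Python) =====
-- def _find_all_block_slices(lines: list[str], keyword: str) -> list[tuple[int, int]]:
--     """`-4  KEYWORD` 부터 다음 단독 `-3` 줄까지(포함) 인덱스 구간. FRD 내 순서 = *STEP 순서."""
--     ranges: list[tuple[int, int]] = []
--     i = 0
--     n = len(lines)
--     while i < n:
--         stripped = lines[i].strip()
--         if stripped.startswith("-4") and keyword in lines[i]:
--             start = i
--             i += 1
--             while i < n:
--                 if lines[i].strip() == "-3":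
--                     ranges.append((start, i))
--                     i += 1
--                     break
--                 i += 1
--             continue
--         i += 1
--     return ranges
-- ===== SOURCE B (Python) =====
-- def _find_all_block_slices(lines: list[str], keyword: str) -> list[tuple[int, int]]:
--     starts = [i for i, ln in enumerate(lines) if ln.strip().startswith("-4") and keyword in ln]
--     ends = [i for i, ln in enumerate(lines) if ln.strip() == "-3"]
--     ranges: list[tuple[int, int]] = []
--     j = 0
--     last_end = -1
--     for s in starts:
--         if s <= last_end:
--             continue
--         while j < len(ends) and ends[j] <= s:
--             j += 1
--         if j == len(ends):
--             break
--         ranges.append((s, ends[j]))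
--         last_end = ends[j]
--         j += 1
--     return ranges
-- ===== Notes on version B (the rewrite author's own statement) =====
-- stated objective: alternative
-- what changed: Replaces A's nested while-loop cursor scan with two independent comprehension passes collecting start and end marker indices, then a two-pointer merge (skip starts inside the previous block, advance an ends pointer past the start) that pairs them.
import Mathlib
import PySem

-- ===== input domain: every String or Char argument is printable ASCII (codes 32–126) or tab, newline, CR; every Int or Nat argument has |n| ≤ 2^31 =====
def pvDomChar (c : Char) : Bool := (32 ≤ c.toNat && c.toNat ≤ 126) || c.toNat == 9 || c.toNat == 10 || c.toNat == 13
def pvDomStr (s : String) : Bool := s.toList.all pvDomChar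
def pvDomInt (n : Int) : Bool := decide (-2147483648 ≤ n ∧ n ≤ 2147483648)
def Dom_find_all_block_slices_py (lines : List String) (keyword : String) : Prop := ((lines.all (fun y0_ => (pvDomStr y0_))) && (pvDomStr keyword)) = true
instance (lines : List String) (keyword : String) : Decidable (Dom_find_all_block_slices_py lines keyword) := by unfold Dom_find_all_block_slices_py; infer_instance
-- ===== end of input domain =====

-- B replaces A's nested while-loop cursor scan by two marker-index passes and a two-pointer merge (alternative decomposition, same cost).

-- ===== PORT A =====
-- outer while loop: pvGoA; inner 'scan for -3' while loop: pvInnerA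
mutual
def pvGoA (lines : List String) (keyword : String) (i : Nat) : List (Int × Int) :=
  if _h : i < lines.length then
    let stripped := PySem.Str.strip (lines.getD i "")
    if PySem.Str.startswith stripped "-4" && PySem.Str.isIn keyword (lines.getD i "") then
      pvInnerA lines keyword i (i + 1)
    else
      pvGoA lines keyword (i + 1)
  else []
termination_by (lines.length - i, 1)
decreasing_by all_goals omega
def pvInnerA (lines : List String) (keyword : String) (start j : Nat) : List (Int × Int) :=
  if _h : j < lines.length then
    if PySem.Str.strip (lines.getD j "") == "-3" then
      ((start : Int), (j : Int)) :: pvGoA lines keyword (j + 1)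
    else
      pvInnerA lines keyword start (j + 1)
  else []
termination_by (lines.length - j, 2)
decreasing_by all_goals omega
end

def find_all_block_slices_py (lines : List String) (keyword : String) : List (Int × Int) :=
  pvGoA lines keyword 0

-- ===== PORT B =====
-- the for-loop over starts with the in-place j pointer into ends; 'while j < len(ends) and ends[j] <= s' is the dropWhile
def pvMerge (starts ends : List Int) (lastEnd : Int) : List (Int × Int) :=
  match starts with
  | [] => []
  | s :: rest =>
    if s ≤ lastEnd then pvMerge rest ends lastEnd
    else
      match ends.dropWhile (fun e => e ≤ s) with
      | [] => []
      | e :: erest => (s, e) :: pvMerge rest erest e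

def find_all_block_slices_py_alt (lines : List String) (keyword : String) : List (Int × Int) :=
  let starts := ((PySem.List.enumerate lines).filter
    (fun p => PySem.Str.startswith (PySem.Str.strip p.2) "-4" && PySem.Str.isIn keyword p.2)).map (fun p => p.1)
  let ends := ((PySem.List.enumerate lines).filter
    (fun p => PySem.Str.strip p.2 == "-3")).map (fun p => p.1)
  pvMerge starts ends (-1)

-- ===== PRECONDITION & SPEC =====
def Spec_find_all_block_slices_py (lines : List String) (keyword : String) (out : List (Int × Int)) : Prop := out = find_all_block_slices_py_alt lines keyword
instance (lines : List String) (keyword : String) (out : List (Int × Int)) : Decidable (Spec_find_all_block_slices_py lines keyword out) := by unfold Spec_find_all_block_slices_py; infer_instance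

-- ===== CLAIM (what is proved, stated in full; the proofs are below) =====
def Claim_equal_find_all_block_slices_py : Prop := ∀ (lines : List String) (keyword : String), Dom_find_all_block_slices_py lines keyword → Spec_find_all_block_slices_py lines keyword (find_all_block_slices_py lines keyword)

-- ===== LEMMAS AND PROOFS =====

-- the two marker predicates, read through pyGetD at an index
def pvIsS (lines : List String) (keyword : String) (j : Int) : Bool :=
  PySem.Str.startswith (PySem.Str.strip (PySem.List.pyGetD lines j "")) "-4" &&
    PySem.Str.isIn keyword (PySem.List.pyGetD lines j "")
def pvIsE (lines : List String) (j : Int) : Bool :=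
  PySem.Str.strip (PySem.List.pyGetD lines j "") == "-3"

-- start-marker indices ≥ i, end-marker indices ≥ i
def pvSF (lines : List String) (keyword : String) (i : Nat) : List Int :=
  (PySem.List.pyRange i lines.length 1).filter (pvIsS lines keyword)
def pvEF (lines : List String) (i : Nat) : List Int :=
  (PySem.List.pyRange i lines.length 1).filter (pvIsE lines)

theorem pvSF_nil (lines : List String) (keyword : String) (i : Nat) (h : lines.length ≤ i) :
    pvSF lines keyword i = [] := by
  unfold pvSF
  rw [PySem.List.pyRange_one_eq_nil (by exact_mod_cast h)]
  rfl

theorem pvEF_nil (lines : List String) (i : Nat) (h : lines.length ≤ i) :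
    pvEF lines i = [] := by
  unfold pvEF
  rw [PySem.List.pyRange_one_eq_nil (by exact_mod_cast h)]
  rfl

theorem pvSF_cons (lines : List String) (keyword : String) (i : Nat) (h : i < lines.length) :
    pvSF lines keyword i =
      (if pvIsS lines keyword i then [(i : Int)] else []) ++ pvSF lines keyword (i + 1) := by
  unfold pvSF
  rw [PySem.List.pyRange_one_cons (by exact_mod_cast h), List.filter_cons]
  push_cast
  split <;> simp

theorem pvEF_cons (lines : List String) (i : Nat) (h : i < lines.length) :
    pvEF lines i = (if pvIsE lines i then [(i : Int)] else []) ++ pvEF lines (i + 1) := by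
  unfold pvEF
  rw [PySem.List.pyRange_one_cons (by exact_mod_cast h), List.filter_cons]
  push_cast
  split <;> simp

theorem pvSF_mem_lb (lines : List String) (keyword : String) (i : Nat) (x : Int)
    (hx : x ∈ pvSF lines keyword i) : (i : Int) ≤ x :=
  (PySem.List.mem_pyRange_one.mp (List.mem_filter.mp hx).1).1

theorem pvEF_mem_lb (lines : List String) (i : Nat) (x : Int)
    (hx : x ∈ pvEF lines i) : (i : Int) ≤ x :=
  (PySem.List.mem_pyRange_one.mp (List.mem_filter.mp hx).1).1

-- a prefix of starts all ≤ lastEnd is skipped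
theorem pvMerge_skip_prefix (P rest ends : List Int) (le : Int) (h : ∀ x ∈ P, x ≤ le) :
    pvMerge (P ++ rest) ends le = pvMerge rest ends le := by
  induction P with
  | nil => rfl
  | cons p P ih =>
    have hp : p ≤ le := h p (by simp)
    simp [pvMerge, hp, ih (fun x hx => h x (by simp [hx]))]

-- an end index below every pending start is dropped by the first dropWhile
theorem pvMerge_drop_end (S E : List Int) (c le : Int) (h : ∀ s ∈ S, c < s) :
    pvMerge S (c :: E) le = pvMerge S E le := by
  induction S generalizing le with
  | nil => rfl
  | cons s S ih =>
    have hcs : c ≤ s := le_of_lt (h s (by simp))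
    by_cases hle : s ≤ le
    · simp [pvMerge, hle, ih le (fun x hx => h x (by simp [hx]))]
    · simp [pvMerge, hle, hcs]

-- pvSF a with the part below b skipped equals pvSF b
theorem pvMerge_SF_skip (lines : List String) (keyword : String) (a b : Nat) (X : List Int)
    (le : Int) (hab : a ≤ b) (hle : (b : Int) ≤ le + 1) :
    pvMerge (pvSF lines keyword a) X le = pvMerge (pvSF lines keyword b) X le := by
  by_cases hb : b ≤ lines.length
  · have hsplit : pvSF lines keyword a =
        (PySem.List.pyRange a b 1).filter (pvIsS lines keyword) ++ pvSF lines keyword b := by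
      unfold pvSF
      rw [← List.filter_append,
        ← PySem.List.pyRange_one_append (a : Int) b lines.length (by exact_mod_cast hab)
          (by exact_mod_cast hb)]
    rw [hsplit, pvMerge_skip_prefix]
    intro x hx
    have := (PySem.List.mem_pyRange_one.mp (List.mem_filter.mp hx).1).2
    omega
  · have h1 : pvSF lines keyword b = [] := pvSF_nil lines keyword b (by omega)
    have h2 := pvMerge_skip_prefix (pvSF lines keyword a) [] X le (by
      intro x hx
      have hub := (PySem.List.mem_pyRange_one.mp (List.mem_filter.mp hx).1).2
      omega)
    rw [h1]
    simpa using h2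

-- dropping ends ≤ s from pvEF j yields pvEF (s+1)
theorem pvEF_dropWhile (lines : List String) (j s : Nat) (h : j ≤ s + 1) :
    (pvEF lines j).dropWhile (fun e => e ≤ (s : Int)) = pvEF lines (s + 1) := by
  obtain ⟨d, hd⟩ : ∃ d, s + 1 - j = d := ⟨_, rfl⟩
  induction d generalizing j with
  | zero =>
    have hj : j = s + 1 := by omega
    subst hj
    cases hE : pvEF lines (s + 1) with
    | nil => simp
    | cons e rest =>
      have he : (s : Int) + 1 ≤ e := by
        have : e ∈ pvEF lines (s + 1) := by rw [hE]; simp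
        have := pvEF_mem_lb lines (s + 1) e this
        push_cast at this ⊢
        omega
      rw [List.dropWhile_cons]
      simp
      omega
  | succ d ihd =>
    by_cases hjn : j < lines.length
    · rw [pvEF_cons lines j hjn]
      by_cases hE : pvIsE lines j
      · simp only [hE, if_true, List.singleton_append, List.dropWhile_cons]
        have : ((j : Int) ≤ (s : Int)) = True := by simp; omega
        simp only [this, decide_true, if_true]
        rw [ihd (j + 1) (by omega) (by omega)]
      · simp only [hE]
        exact ihd (j + 1) (by omega) (by omega)
    · rw [pvEF_nil lines j (by omega), pvEF_nil lines (s + 1) (by omega)]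
      rfl

-- the main invariant, strong induction on lines.length - i
theorem pvMain (lines : List String) (keyword : String) : ∀ k : Nat,
    (∀ i : Nat, lines.length - i ≤ k → ∀ le : Int, le < (i : Int) →
      pvGoA lines keyword i = pvMerge (pvSF lines keyword i) (pvEF lines i) le) ∧
    (∀ start j : Nat, lines.length - j ≤ k → start < j →
      pvInnerA lines keyword start j =
        match pvEF lines j with
        | [] => []
        | e :: erest => ((start : Int), e) :: pvMerge (pvSF lines keyword (start + 1)) erest e) := by
  intro k
  induction k using Nat.strong_induction_on with
  | _ k IH =>
  constructor
  · intro i hik le hle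
    by_cases hi : i < lines.length
    · have hcond : pvIsS lines keyword i =
          (PySem.Str.startswith (PySem.Str.strip (lines.getD i "")) "-4" &&
            PySem.Str.isIn keyword (lines.getD i "")) := by
        simp [pvIsS]
      rw [pvGoA]
      simp only [hi, dif_pos]
      by_cases hs : pvIsS lines keyword (i : Int) = true
      · rw [hcond] at hs
        simp only [hs, if_true]
        have hk1 : lines.length - (i + 1) < k := by omega
        have hin := ((IH _ hk1).2) i (i + 1) (le_refl _) (by omega)
        rw [hin]
        rw [pvSF_cons lines keyword i hi]
        rw [← hcond] at hs
        simp only [hs, if_true, List.singleton_append]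
        rw [pvMerge]
        have hnle : ¬ ((i : Int) ≤ le) := by omega
        simp only [hnle, if_false]
        rw [pvEF_dropWhile lines i i (by omega)]
      · rw [hcond] at hs
        simp only [hs]
        have hk1 : lines.length - (i + 1) < k := by omega
        have hgo := ((IH _ hk1).1) (i + 1) (le_refl _) le (by push_cast; omega)
        rw [hgo]
        rw [pvSF_cons lines keyword i hi, ← hcond] at *
        simp only [hs] at *
        rw [pvEF_cons lines i hi]
        by_cases hE : pvIsE lines i
        · simp only [hE, if_true, List.singleton_append]
          exact (pvMerge_drop_end (pvSF lines keyword (i + 1)) (pvEF lines (i + 1)) i le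
            (fun x hx => by
              have := pvSF_mem_lb lines keyword (i + 1) x hx
              push_cast at this
              omega)).symm
        · simp [hE]
    · rw [pvGoA]
      simp only [hi, dif_neg, not_false_iff]
      rw [pvSF_nil lines keyword i (by omega)]
      rfl
  · intro start j hjk hsj
    by_cases hj : j < lines.length
    · have hcond : pvIsE lines j = (PySem.Str.strip (lines.getD j "") == "-3") := by
        simp [pvIsE]
      rw [pvInnerA]
      simp only [hj, dif_pos]
      by_cases hE : pvIsE lines (j : Int) = true
      · rw [hcond] at hE
        simp only [hE, if_true]
        have hk1 : lines.length - (j + 1) < k := by omega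
        have hgo := ((IH _ hk1).1) (j + 1) (le_refl _) (j : Int) (by push_cast; omega)
        rw [hgo]
        rw [pvEF_cons lines j hj, ← hcond] at *
        simp only [hE, if_true, List.singleton_append]
        rw [pvMerge_SF_skip lines keyword (start + 1) (j + 1)
          (pvEF lines (j + 1)) (j : Int) (by omega) (by push_cast; omega)]
      · have hEb2 : pvIsE lines (j : Int) = false := by simpa using hE
        have hEb : (PySem.Str.strip (lines.getD j "") == "-3") = false := by
          rw [← hcond]; exact hEb2
        simp only [hEb, Bool.false_eq_true, if_false]
        have hk1 : lines.length - (j + 1) < k := by omega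
        have hin := ((IH _ hk1).2) start (j + 1) (le_refl _) (by omega)
        rw [hin]
        rw [pvEF_cons lines j hj]
        simp [hEb2]
    · rw [pvInnerA]
      simp only [hj, dif_neg, not_false_iff]
      rw [pvEF_nil lines j (by omega)]

theorem pvEnumBridge (lines : List String) (q : String → Bool) :
    ((PySem.List.enumerate lines).filter (fun p => q p.2)).map (fun p => p.1)
      = (PySem.List.pyRange 0 lines.length 1).filter (fun j => q (PySem.List.pyGetD lines j "")) := by
  rw [PySem.List.enumerate_eq_map_pyRange (d := ""), List.filter_map, List.map_map]
  simp only [Function.comp_def]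
  simp

theorem find_all_block_slices_py_spec_aux (lines : List String) (keyword : String) :
    find_all_block_slices_py lines keyword = find_all_block_slices_py_alt lines keyword := by
  have hmain := ((pvMain lines keyword lines.length).1) 0 (by omega) (-1) (by omega)
  have h1 := pvEnumBridge lines
    (fun s => PySem.Str.startswith (PySem.Str.strip s) "-4" && PySem.Str.isIn keyword s)
  have h2 := pvEnumBridge lines (fun s => PySem.Str.strip s == "-3")
  unfold find_all_block_slices_py find_all_block_slices_py_alt
  rw [hmain]
  simp only [h1, h2]
  unfold pvSF pvEF pvIsS pvIsE
  simp

-- ===== VERDICT (by name: the statement is the Claim_ definition above) =====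
theorem find_all_block_slices_py_spec : Claim_equal_find_all_block_slices_py := by
  intro lines keyword _
  exact find_all_block_slices_py_spec_aux lines keyword
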